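-- pv_equiv track=rewrite | github.com/Raheedpasha10/steganography_with_Ai_Integration | shared/steganography/text_steganography.py | _extract_whitespace
-- ===== SOURCE A (Python) =====
-- def _extract_whitespace(stego_text: str) -> str:
--     """
--     Extract message from whitespace variation (tabs and spaces)
--
--     Args:
--         stego_text (str): The text containing the hidden message
--
--     Returns:
--         str: The extracted secret message
--     """
--     # Parse the text to find tabs and spaces between words
--     binary_message = ""
--     parts = []
--     current_part = ""
--
--     for char in stego_text:
--         if char in [' ', '\t']:
--             if current_part:  # If we have accumulated a word
--                 parts.append(current_part)
--                 current_part = ""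
--             parts.append(char)  # Add the whitespace character
--         else:
--             current_part += char
--
--     if current_part:  # Don't forget the last word
--         parts.append(current_part)
--
--     # Now extract bits from whitespace characters
--     for part in parts:
--         if part == '\t':
--             binary_message += '1'
--         elif part == ' ':
--             binary_message += '0'
--
--     # Convert binary to text
--     message = ""
--     # Process in 8-bit chunks
--     for i in range(0, len(binary_message), 8):
--         if i + 8 <= len(binary_message):
--             byte = binary_message[i:i+8]
--             if byte == '00000000':  # End of message marker
--                 break
--             try:
--                 char = chr(int(byte, 2))
--                 message += char
--             except ValueError:
--                 # Skip invalid bytes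
--                 continue
--
--     return message
-- ===== SOURCE B (Python) =====
-- def _extract_whitespace(stego_text: str) -> str:
--     # One fused pass: accumulate the current byte's value directly from each
--     # space/tab; emit a character every 8 bits, stop at the null byte.
--     message = []
--     val = 0
--     count = 0
--     for c in stego_text:
--         if c == ' ' or c == '\t':
--             val = val * 2 + (1 if c == '\t' else 0)
--             count += 1
--             if count == 8:
--                 if val == 0:
--                     return ''.join(message)
--                 message.append(chr(val))
--                 val = 0
--                 count = 0
--     return ''.join(message)
-- ===== Notes on version B (the rewrite author's own statement) =====
-- stated objective: faster
-- what changed: Replaced A's three phases (word/whitespace parts list, bit-string construction, 8-bit chunk decoding via int(byte,2)/chr) with a single fused pass that accumulates each byte's numeric value directly from spaces and tabs, emitting a character every 8 bits and stopping at value 0; no intermediate parts list or bit string is built.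
import Mathlib
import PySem

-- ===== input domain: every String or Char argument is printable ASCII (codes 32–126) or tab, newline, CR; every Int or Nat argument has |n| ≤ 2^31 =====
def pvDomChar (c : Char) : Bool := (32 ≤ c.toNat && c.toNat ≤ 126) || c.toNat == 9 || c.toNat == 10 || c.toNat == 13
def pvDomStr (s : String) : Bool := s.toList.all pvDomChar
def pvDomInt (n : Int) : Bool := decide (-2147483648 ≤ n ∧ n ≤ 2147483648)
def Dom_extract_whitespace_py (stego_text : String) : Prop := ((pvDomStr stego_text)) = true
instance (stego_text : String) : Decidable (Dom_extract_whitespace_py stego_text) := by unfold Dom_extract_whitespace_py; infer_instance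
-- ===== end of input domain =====

-- B fuses A's three phases (parts list, bit string, chunk decode) into one accumulator pass; same return value.


-- ===== PORT A =====
-- the body of A's first loop: split into words and single whitespace chars
def pvAStep (st : List (List Char) × List Char) (ch : Char) : List (List Char) × List Char :=
  if ch = ' ' ∨ ch = '\t' then
    (if st.2 ≠ [] then st.1 ++ [st.2] ++ [[ch]] else st.1 ++ [[ch]], [])
  else (st.1, st.2 ++ [ch])

-- A's second loop: collect '1' for tab parts, '0' for space parts
def pvABits (parts : List (List Char)) : List Char :=
  parts.foldl (fun bm p => if p = ['\t'] then bm ++ ['1'] else if p = [' '] then bm ++ ['0'] else bm) []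

-- A's third loop: 8-bit chunks, break on '00000000', chr(int(byte, 2))
def pvADecode (bits : List Char) : List Char :=
  if _h : 8 ≤ bits.length then
    let byte := bits.take 8
    if byte = ['0','0','0','0','0','0','0','0'] then []
    else
      match PySem.Int.ofCharsBase? byte 2 with
      | some n => Char.ofNat n.toNat :: pvADecode (bits.drop 8)
      | none => pvADecode (bits.drop 8)
  else []
termination_by bits.length
decreasing_by simp; omega

def extract_whitespace_py (stego_text : String) : String :=
  let st := stego_text.toList.foldl pvAStep ([], [])
  let parts := if st.2 ≠ [] then st.1 ++ [st.2] else st.1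
  String.mk (pvADecode (pvABits parts))

-- ===== PORT B =====
-- B's single loop: accumulate (val, count) over spaces/tabs, emit a char each 8 bits,
-- return early on the null byte
def pvBLoop : List Char → List Char → Int → Int → List Char
  | [], msg, _, _ => msg
  | ch :: rest, msg, val, count =>
    if ch = ' ' ∨ ch = '\t' then
      let val' := val * 2 + (if ch = '\t' then 1 else 0)
      let count' := count + 1
      if count' = 8 then
        if val' = 0 then msg
        else pvBLoop rest (msg ++ [Char.ofNat val'.toNat]) 0 0
      else pvBLoop rest msg val' count'
    else pvBLoop rest msg val count

def extract_whitespace_py_alt (stego_text : String) : String :=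
  String.mk (pvBLoop stego_text.toList [] 0 0)

-- ===== PRECONDITION & SPEC =====
def Spec_extract_whitespace_py (stego_text : String) (out : String) : Prop := out = extract_whitespace_py_alt stego_text
instance (stego_text : String) (out : String) : Decidable (Spec_extract_whitespace_py stego_text out) := by unfold Spec_extract_whitespace_py; infer_instance

-- ===== CLAIM (what is proved, stated in full; the proofs are below) =====
def Claim_equal_extract_whitespace_py : Prop := ∀ (stego_text : String), Dom_extract_whitespace_py stego_text → Spec_extract_whitespace_py stego_text (extract_whitespace_py stego_text)

-- ===== LEMMAS AND PROOFS =====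

-- the bit string both programs implicitly compute
def pvBMap (cs : List Char) : List Char :=
  (cs.filter (fun c => c = ' ' ∨ c = '\t')).map (fun c => if c = '\t' then '1' else '0')

-- B's loop replayed over the bit characters themselves
def pvBitRun : List Char → List Char → Int → Int → List Char
  | [], msg, _, _ => msg
  | b :: rest, msg, val, count =>
    let val' := val * 2 + (if b = '1' then 1 else 0)
    let count' := count + 1
    if count' = 8 then
      if val' = 0 then msg
      else pvBitRun rest (msg ++ [Char.ofNat val'.toNat]) 0 0
    else pvBitRun rest msg val' count'

def pvHorner (v : Int) (cs : List Char) : Int :=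
  cs.foldl (fun v c => v * 2 + (if c = '1' then 1 else 0)) v

lemma pvABits_acc (qs : List (List Char)) (acc : List Char) :
    List.foldl (fun bm p => if p = ['\t'] then bm ++ ['1'] else if p = [' '] then bm ++ ['0'] else bm) acc qs
      = acc ++ pvABits qs := by
  induction qs generalizing acc with
  | nil => simp [pvABits]
  | cons p qs ih =>
    simp only [pvABits, List.foldl_cons] at *
    rw [ih, ih]
    split_ifs
    · simp [ih ['1']]
    · simp [ih ['0']]
    · simp

lemma pvABits_append (ps qs : List (List Char)) :
    pvABits (ps ++ qs) = pvABits ps ++ pvABits qs := by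
  unfold pvABits
  rw [List.foldl_append]
  rw [pvABits_acc]
  rfl

lemma pvFinalize_bits (parts : List (List Char)) (cur : List Char)
    (hc : ¬ (' ' ∈ cur) ∧ ¬ ('\t' ∈ cur)) :
    pvABits (if cur ≠ [] then parts ++ [cur] else parts) = pvABits parts := by
  split_ifs with h
  · rw [pvABits_append]
    have h1 : cur ≠ ['\t'] := by rintro rfl; exact hc.2 (by simp)
    have h2 : cur ≠ [' '] := by rintro rfl; exact hc.1 (by simp)
    simp [pvABits, h1, h2]
  · rfl

lemma pvExtract_bits (cs : List Char) (parts : List (List Char)) (cur : List Char)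
    (hc : ¬ (' ' ∈ cur) ∧ ¬ ('\t' ∈ cur)) :
    pvABits (let st := cs.foldl pvAStep (parts, cur);
             if st.2 ≠ [] then st.1 ++ [st.2] else st.1)
      = pvABits (if cur ≠ [] then parts ++ [cur] else parts) ++ pvBMap cs := by
  induction cs generalizing parts cur with
  | nil => simp [pvBMap]
  | cons c cs ih =>
    by_cases hw : c = ' ' ∨ c = '\t'
    · have hstep : pvAStep (parts, cur) c
          = ((if cur ≠ [] then parts ++ [cur] else parts) ++ [[c]], []) := by
        simp only [pvAStep, if_pos hw]
        split_ifs <;> simp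
      simp only [List.foldl_cons, hstep]
      rw [ih _ _ (by simp)]
      rw [if_neg (by simp : ¬(([]:List Char) ≠ []))]
      have hbit : pvBMap (c :: cs) = (if c = '\t' then '1' else '0') :: pvBMap cs := by
        simp [pvBMap, hw]
      rw [hbit, pvABits_append]
      have : pvABits [[c]] = [if c = '\t' then '1' else '0'] := by
        rcases hw with rfl | rfl <;> simp [pvABits]
      simp [this]
    · rw [not_or] at hw
      have hstep : pvAStep (parts, cur) c = (parts, cur ++ [c]) := by
        simp [pvAStep, hw]
      simp only [List.foldl_cons, hstep]
      rw [ih _ _ (by simp [hc.1, hc.2, Ne.symm hw.1, Ne.symm hw.2])]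
      have hbm : pvBMap (c :: cs) = pvBMap cs := by simp [pvBMap, hw]
      rw [hbm]
      congr 1
      rw [pvFinalize_bits parts cur hc,
          pvFinalize_bits parts (cur ++ [c]) (by simp [hc.1, hc.2, Ne.symm hw.1, Ne.symm hw.2])]

lemma pvBLoop_eq_bitRun (cs msg : List Char) (val count : Int) :
    pvBLoop cs msg val count = pvBitRun (pvBMap cs) msg val count := by
  induction cs generalizing msg val count with
  | nil => simp [pvBLoop, pvBitRun, pvBMap]
  | cons c cs ih =>
    by_cases hw : c = ' ' ∨ c = '\t'
    · have hbm : pvBMap (c :: cs) = (if c = '\t' then '1' else '0') :: pvBMap cs := by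
        simp [pvBMap, hw]
      have hbit : (if (if c = '\t' then '1' else '0') = '1' then (1:Int) else 0)
          = (if c = '\t' then 1 else 0) := by split_ifs <;> simp_all
      rw [hbm]
      simp only [pvBLoop, pvBitRun, if_pos hw, hbit]
      split_ifs <;> simp [ih]
    · have hbm : pvBMap (c :: cs) = pvBMap cs := by
        rw [not_or] at hw
        simp [pvBMap, hw]
      simp only [pvBLoop, if_neg hw, hbm, ih]

lemma pvBitRun_short (bits msg : List Char) (val count : Int)
    (h : count + bits.length < 8) (hcnt : 0 ≤ count) :
    pvBitRun bits msg val count = msg := by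
  induction bits generalizing msg val count with
  | nil => simp [pvBitRun]
  | cons b bits ih =>
    simp only [pvBitRun]
    rw [if_neg (by simp at h; omega)]
    exact ih _ _ _ (by simp at h ⊢; omega) (by omega)

lemma pvBitRun_unroll (byte rest msg : List Char) (val count : Int)
    (hlen : count + byte.length = 8) (hne : byte ≠ []) :
    pvBitRun (byte ++ rest) msg val count
      = (if pvHorner val byte = 0 then msg
         else pvBitRun rest (msg ++ [Char.ofNat (pvHorner val byte).toNat]) 0 0) := by
  induction byte generalizing msg val count with
  | nil => exact absurd rfl hne
  | cons b byte ih =>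
    simp only [List.cons_append, pvBitRun]
    rcases byte with _ | ⟨b2, byte'⟩
    · have : count + 1 = 8 := by simpa using hlen
      rw [if_pos this]
      simp [pvHorner]
    · have hcount : ¬ (count + 1 = 8) := by simp at hlen; omega
      rw [if_neg hcount]
      rw [ih _ _ _ (by simp at hlen ⊢; omega) (by simp)]
      simp [pvHorner]

-- int(byte, 2) on an 8-character 0/1 byte: its value, and value 0 ↔ the null byte
lemma pvByte_val (a b c d e f g h : Char)
    (ha : a = '0' ∨ a = '1') (hb : b = '0' ∨ b = '1') (hc : c = '0' ∨ c = '1')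
    (hd : d = '0' ∨ d = '1') (he : e = '0' ∨ e = '1') (hf : f = '0' ∨ f = '1')
    (hg : g = '0' ∨ g = '1') (hh : h = '0' ∨ h = '1') :
    PySem.Int.ofCharsBase? [a,b,c,d,e,f,g,h] 2 = some (pvHorner 0 [a,b,c,d,e,f,g,h])
    ∧ (pvHorner 0 [a,b,c,d,e,f,g,h] = 0 ↔ [a,b,c,d,e,f,g,h] = ['0','0','0','0','0','0','0','0']) := by
  rcases ha with rfl | rfl <;> rcases hb with rfl | rfl <;> rcases hc with rfl | rfl <;>
    rcases hd with rfl | rfl <;> rcases he with rfl | rfl <;> rcases hf with rfl | rfl <;>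
    rcases hg with rfl | rfl <;> rcases hh with rfl | rfl <;>
    exact ⟨by decide, by decide⟩

lemma pvBitRun_eq_decode (bits : List Char)
    (h01 : ∀ c ∈ bits, c = '0' ∨ c = '1') :
    ∀ msg, pvBitRun bits msg 0 0 = msg ++ pvADecode bits := by
  fun_induction pvADecode bits with
  | case1 bits hlen byte hnull =>
    intro msg
    rcases bits with _|⟨a,_|⟨b,_|⟨c,_|⟨d,_|⟨e,_|⟨f,_|⟨g,_|⟨h,rest⟩⟩⟩⟩⟩⟩⟩⟩ <;> simp at hlen
    have hbyte : byte = [a,b,c,d,e,f,g,h] := by simp [byte]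
    have hv := pvByte_val a b c d e f g h (h01 a (by simp)) (h01 b (by simp))
      (h01 c (by simp)) (h01 d (by simp)) (h01 e (by simp)) (h01 f (by simp))
      (h01 g (by simp)) (h01 h (by simp))
    have hz : pvHorner 0 [a,b,c,d,e,f,g,h] = 0 := hv.2.mpr (hbyte ▸ hnull)
    have := pvBitRun_unroll [a,b,c,d,e,f,g,h] rest msg 0 0 (by simp) (by simp)
    simp only [List.cons_append, List.nil_append] at this
    rw [this, if_pos hz]
    simp
  | case2 bits hlen byte hnull n hmatch ih =>
    intro msg
    rcases bits with _|⟨a,_|⟨b,_|⟨c,_|⟨d,_|⟨e,_|⟨f,_|⟨g,_|⟨h,rest⟩⟩⟩⟩⟩⟩⟩⟩ <;> simp at hlen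
    have hbyte : byte = [a,b,c,d,e,f,g,h] := by simp [byte]
    have hv := pvByte_val a b c d e f g h (h01 a (by simp)) (h01 b (by simp))
      (h01 c (by simp)) (h01 d (by simp)) (h01 e (by simp)) (h01 f (by simp))
      (h01 g (by simp)) (h01 h (by simp))
    have hn : n = pvHorner 0 [a,b,c,d,e,f,g,h] := by
      have := hv.1
      rw [← hbyte] at this
      rw [hmatch] at this
      exact (Option.some.injEq _ _).mp this
    have hz : ¬ pvHorner 0 [a,b,c,d,e,f,g,h] = 0 := fun hzz =>
      hnull (hbyte ▸ hv.2.mp hzz)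
    have hun := pvBitRun_unroll [a,b,c,d,e,f,g,h] rest msg 0 0 (by simp) (by simp)
    simp only [List.cons_append, List.nil_append] at hun
    rw [hun, if_neg hz, ← hn]
    have hrest : ∀ x ∈ rest, x = '0' ∨ x = '1' := fun x hx => h01 x (by simp [hx])
    have hdrop : (a::b::c::d::e::f::g::h::rest).drop 8 = rest := by simp
    rw [hdrop] at ih
    rw [ih hrest (msg ++ [Char.ofNat n.toNat])]
    simp
  | case3 bits hlen byte hnull hmatch ih =>
    exfalso
    rcases bits with _|⟨a,_|⟨b,_|⟨c,_|⟨d,_|⟨e,_|⟨f,_|⟨g,_|⟨h,rest⟩⟩⟩⟩⟩⟩⟩⟩ <;> simp at hlen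
    have hbyte : byte = [a,b,c,d,e,f,g,h] := by simp [byte]
    have hv := pvByte_val a b c d e f g h (h01 a (by simp)) (h01 b (by simp))
      (h01 c (by simp)) (h01 d (by simp)) (h01 e (by simp)) (h01 f (by simp))
      (h01 g (by simp)) (h01 h (by simp))
    rw [hbyte, hv.1] at hmatch
    simp at hmatch
  | case4 bits hlen =>
    intro msg
    rw [pvBitRun_short bits msg 0 0 (by omega) (by norm_num)]
    simp

lemma pvBMap_01 (cs : List Char) : ∀ c ∈ pvBMap cs, c = '0' ∨ c = '1' := by
  intro c hcmem
  simp only [pvBMap, List.mem_map] at hcmem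
  obtain ⟨x, _, hx⟩ := hcmem
  split_ifs at hx <;> simp [← hx]

-- ===== VERDICT (by name: the statement is the Claim_ definition above) =====
theorem extract_whitespace_py_spec : Claim_equal_extract_whitespace_py := by
  intro s _
  show extract_whitespace_py s = extract_whitespace_py_alt s
  unfold extract_whitespace_py extract_whitespace_py_alt
  have hA := pvExtract_bits s.toList [] [] (by simp)
  rw [if_neg (by simp : ¬(([]:List Char) ≠ []))] at hA
  rw [(by rfl : pvABits ([] : List (List Char)) = []), List.nil_append] at hA
  rw [pvBLoop_eq_bitRun]
  rw [pvBitRun_eq_decode (pvBMap s.toList) (pvBMap_01 s.toList) []]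
  rw [List.nil_append]
  exact congrArg (fun bits => String.mk (pvADecode bits)) hA
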